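-- pv_equiv track=rewrite | github.com/maxmurtazin/Ant-RH | scripts/run_v14_7_antipoisson_spectral_curriculum.py | clamp_word_to_dim
-- ===== SOURCE A (Python) =====
-- from typing import Any, DefaultDict, Dict, Iterable, List, Optional, Sequence, Tuple
--
-- def simplify_word(word: List[Tuple[int, int]], *, max_power: int, max_word_len: int) -> List[Tuple[int, int]]:
--     out: List[Tuple[int, int]] = []
--     for i, p in word:
--         i = int(i)
--         p = int(max(-max_power, min(max_power, int(p))))
--         if p == 0:
--             continue
--         if out and out[-1][0] == i:
--             pp = int(out[-1][1] + p)
--             pp = int(max(-max_power, min(max_power, pp)))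
--             out[-1] = (i, pp)
--             if out[-1][1] == 0:
--                 out.pop()
--             continue
--         out.append((i, p))
--         if len(out) >= int(max_word_len):
--             break
--     return out
--
-- def clamp_word_to_dim(word: List[Tuple[int, int]], dim: int, max_power: int, max_word_len: int) -> List[Tuple[int, int]]:
--     out: List[Tuple[int, int]] = []
--     for i, p in word:
--         ii = int(max(1, min(int(dim) - 1, int(i))))
--         pp = int(max(-max_power, min(max_power, int(p))))
--         if pp == 0:
--             continue
--         out.append((ii, pp))
--     out = simplify_word(out, max_power=max_power, max_word_len=max_word_len)
--     if len(out) < 2 and out: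
--         i0 = out[0][0]
--         i1 = int(max(1, min(dim - 1, i0 + 1)))
--         out.append((i1, out[0][1]))
--     return out
-- ===== SOURCE B (Python) =====
-- def clamp_word_to_dim(word, dim, max_power, max_word_len):
--     # Single fused pass: clamp, drop zeros, merge-with-top stack discipline,
--     # break once a max_word_len-th distinct entry is appended; then degenerate fixup.
--     acc = []
--     for i, p in word:
--         ii = max(1, min(int(dim) - 1, int(i)))
--         pp = max(-max_power, min(max_power, int(p)))
--         if pp == 0:
--             continue
--         if acc and acc[-1][0] == ii:
--             s = max(-max_power, min(max_power, acc[-1][1] + pp))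
--             if s == 0:
--                 acc.pop()
--             else:
--                 acc[-1] = (ii, s)
--         else:
--             acc.append((ii, pp))
--             if len(acc) >= int(max_word_len):
--                 break
--     if len(acc) == 1:
--         i0, p0 = acc[0]
--         acc.append((max(1, min(dim - 1, i0 + 1)), p0))
--     return acc
-- ===== Notes on version B (the rewrite author's own statement) =====
-- stated objective: simpler
-- what changed: B replaces A's two-pass structure (clamp-and-filter pass building an intermediate list, then the simplify_word helper's merge pass) with one fused normalization loop over the raw word that clamps, skips zeros, merges into the stack top (popping on cancellation) and breaks at max_word_len, followed by the same degenerate fixup.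
import Mathlib
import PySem

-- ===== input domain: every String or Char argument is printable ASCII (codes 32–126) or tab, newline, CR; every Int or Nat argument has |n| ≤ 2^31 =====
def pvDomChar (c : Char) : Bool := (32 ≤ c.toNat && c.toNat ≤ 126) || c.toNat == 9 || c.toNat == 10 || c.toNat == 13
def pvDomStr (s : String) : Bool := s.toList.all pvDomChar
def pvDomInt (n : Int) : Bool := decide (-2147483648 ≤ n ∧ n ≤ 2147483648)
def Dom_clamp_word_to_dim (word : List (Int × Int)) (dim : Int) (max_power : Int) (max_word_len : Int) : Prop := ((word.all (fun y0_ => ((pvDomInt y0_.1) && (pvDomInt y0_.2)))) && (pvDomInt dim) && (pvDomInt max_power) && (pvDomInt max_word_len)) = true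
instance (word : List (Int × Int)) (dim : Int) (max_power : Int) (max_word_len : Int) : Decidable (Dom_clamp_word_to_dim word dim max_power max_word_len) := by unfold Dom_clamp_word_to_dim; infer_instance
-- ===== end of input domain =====

-- B fuses A's clamp pass and the simplify_word helper into one normalization loop; objective: simpler (one pass, one function), not claimed faster.

-- ===== PORT A =====
-- A's first loop: clamp index/power, drop zero powers (append-to-end loop as structural recursion)
def clampFilterA (dim max_power : Int) : List (Int × Int) → List (Int × Int)
  | [] => []
  | (i, p) :: rest =>
    let ii := max 1 (min (dim - 1) i)
    let pp := max (-max_power) (min max_power p)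
    if pp = 0 then clampFilterA dim max_power rest
    else (ii, pp) :: clampFilterA dim max_power rest

-- A's simplify_word loop (out kept in Python order; break returns out)
def simplifyGoA (max_power max_word_len : Int) : List (Int × Int) → List (Int × Int) → List (Int × Int)
  | [], out => out
  | (i, p) :: rest, out =>
    let p' := max (-max_power) (min max_power p)
    if p' = 0 then simplifyGoA max_power max_word_len rest out
    else
      match out.getLast? with
      | some (j, q) =>
        if j = i then
          let pp := max (-max_power) (min max_power (q + p'))
          let out' := out.dropLast ++ [(i, pp)]
          if pp = 0 then simplifyGoA max_power max_word_len rest out'.dropLast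
          else simplifyGoA max_power max_word_len rest out'
        else
          let out' := out ++ [(i, p')]
          if max_word_len ≤ (out'.length : Int) then out'
          else simplifyGoA max_power max_word_len rest out'
      | none =>
        let out' := out ++ [(i, p')]
        if max_word_len ≤ (out'.length : Int) then out'
        else simplifyGoA max_power max_word_len rest out'

def simplify_word (word : List (Int × Int)) (max_power : Int) (max_word_len : Int) : List (Int × Int) :=
  simplifyGoA max_power max_word_len word []

def clamp_word_to_dim (word : List (Int × Int)) (dim : Int) (max_power : Int) (max_word_len : Int) : List (Int × Int) :=
  let out := simplify_word (clampFilterA dim max_power word) max_power max_word_len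
  if out.length < 2 then
    match out with
    | [] => out
    | (i0, p0) :: _ => out ++ [(max 1 (min (dim - 1) (i0 + 1)), p0)]
  else out

-- ===== PORT B =====
-- B's single fused loop; acc is the Python list reversed (append = cons, pop = tail)
def fusedGoB (dim max_power max_word_len : Int) : List (Int × Int) → List (Int × Int) → List (Int × Int)
  | [], acc => acc.reverse
  | (i, p) :: rest, acc =>
    let ii := max 1 (min (dim - 1) i)
    let pp := max (-max_power) (min max_power p)
    if pp = 0 then fusedGoB dim max_power max_word_len rest acc
    else
      match acc with
      | (j, q) :: accTl =>
        if j = ii then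
          let s := max (-max_power) (min max_power (q + pp))
          if s = 0 then fusedGoB dim max_power max_word_len rest accTl
          else fusedGoB dim max_power max_word_len rest ((ii, s) :: accTl)
        else
          if max_word_len ≤ ((acc.length + 1 : Nat) : Int) then ((ii, pp) :: acc).reverse
          else fusedGoB dim max_power max_word_len rest ((ii, pp) :: acc)
      | [] =>
        if max_word_len ≤ (1 : Int) then [(ii, pp)]
        else fusedGoB dim max_power max_word_len rest [(ii, pp)]

def clamp_word_to_dim_alt (word : List (Int × Int)) (dim : Int) (max_power : Int) (max_word_len : Int) : List (Int × Int) :=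
  let out := fusedGoB dim max_power max_word_len word []
  match out with
  | [(i0, p0)] => [(i0, p0), (max 1 (min (dim - 1) (i0 + 1)), p0)]
  | _ => out

-- ===== PRECONDITION & SPEC =====
def Spec_clamp_word_to_dim (word : List (Int × Int)) (dim : Int) (max_power : Int) (max_word_len : Int) (out : List (Int × Int)) : Prop := out = clamp_word_to_dim_alt word dim max_power max_word_len
instance (word : List (Int × Int)) (dim : Int) (max_power : Int) (max_word_len : Int) (out : List (Int × Int)) : Decidable (Spec_clamp_word_to_dim word dim max_power max_word_len out) := by unfold Spec_clamp_word_to_dim; infer_instance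

-- ===== CLAIM (what is proved, stated in full; the proofs are below) =====
def Claim_equal_clamp_word_to_dim : Prop := ∀ (word : List (Int × Int)) (dim : Int) (max_power : Int) (max_word_len : Int), Dom_clamp_word_to_dim word dim max_power max_word_len → Spec_clamp_word_to_dim word dim max_power max_word_len (clamp_word_to_dim word dim max_power max_word_len)

-- ===== LEMMAS AND PROOFS =====

-- clamping is idempotent
theorem clamp_idem (m x : Int) :
    max (-m) (min m (max (-m) (min m x))) = max (-m) (min m x) := by omega

-- fusion: B's loop on the raw word = A's simplify loop on A's clamped list,
-- with the accumulator reversed.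
theorem fuse (dim mp mwl : Int) (ws : List (Int × Int)) :
    ∀ acc : List (Int × Int),
      simplifyGoA mp mwl (clampFilterA dim mp ws) acc.reverse
        = fusedGoB dim mp mwl ws acc := by
  induction ws with
  | nil => intro acc; simp [clampFilterA, simplifyGoA, fusedGoB]
  | cons hd tl ih =>
    intro acc
    obtain ⟨i, p⟩ := hd
    by_cases hpp : max (-mp) (min mp p) = 0
    · simp [clampFilterA, fusedGoB, hpp, ih]
    · rw [show clampFilterA dim mp ((i, p) :: tl)
            = (max 1 (min (dim - 1) i), max (-mp) (min mp p)) :: clampFilterA dim mp tl by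
          simp [clampFilterA, hpp]]
      cases acc with
      | nil =>
        simp only [List.reverse_nil, simplifyGoA, clamp_idem, fusedGoB, hpp,
          List.getLast?_nil, List.nil_append, List.length_cons, List.length_nil]
        norm_num
        split_ifs with h
        · simp
        · simpa using ih [(max 1 (min (dim - 1) i), max (-mp) (min mp p))]
      | cons a t =>
        obtain ⟨j, q⟩ := a
        rw [show ((j, q) :: t).reverse = t.reverse ++ [(j, q)] by simp]
        simp only [simplifyGoA, clamp_idem, List.getLast?_concat,
          List.dropLast_concat, fusedGoB, if_neg hpp]
        by_cases hj : j = max 1 (min (dim - 1) i)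
        · rw [if_pos hj, if_pos hj]
          by_cases hs : max (-mp) (min mp (q + max (-mp) (min mp p))) = 0
          · rw [if_pos hs, if_pos hs]
            exact ih t
          · rw [if_neg hs, if_neg hs, ← hj, ← List.reverse_cons]
            exact ih ((j, max (-mp) (min mp (q + max (-mp) (min mp p)))) :: t)
        · rw [if_neg hj, if_neg hj]
          have hc : (mwl ≤ ((t.reverse ++ [(j, q)] ++ [(max 1 (min (dim - 1) i), max (-mp) (min mp p))]).length : Int))
              ↔ (mwl ≤ ((((j, q) :: t).length + 1 : Nat) : Int)) := by
            simp; omega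
          by_cases hb : mwl ≤ ((((j, q) :: t).length + 1 : Nat) : Int)
          · rw [if_pos (hc.mpr hb), if_pos hb]
            simp
          · rw [if_neg (fun h => hb (hc.mp h)), if_neg hb]
            have := ih ((max 1 (min (dim - 1) i), max (-mp) (min mp p)) :: (j, q) :: t)
            simpa using this

-- ===== VERDICT (by name: the statement is the Claim_ definition above) =====
theorem clamp_word_to_dim_spec : Claim_equal_clamp_word_to_dim := by
  intro word dim mp mwl _
  unfold Spec_clamp_word_to_dim clamp_word_to_dim clamp_word_to_dim_alt simplify_word
  have h := fuse dim mp mwl word []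
  simp only [List.reverse_nil] at h
  rw [h]
  rcases hout : fusedGoB dim mp mwl word [] with _ | ⟨⟨i0, p0⟩, _ | ⟨y, rest⟩⟩ <;> simp
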